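-- pv_equiv track=rewrite | github.com/augw999/Seattle-Data-AI-Hackathon-2025 | agent.py | move_towards
-- ===== SOURCE A (Python) =====
-- def move_towards(x, y, tx, ty, max_steps):
--     """
--     Moves from (x, y) toward (tx, ty) by at most max_steps in Manhattan distance.
--     Returns the new coordinates.
--     """
--     dx = tx - x
--     dy = ty - y
--     if abs(dx) + abs(dy) <= max_steps:
--         return (tx, ty)
--     new_x, new_y = x, y
--     steps = max_steps
--     while steps > 0 and (new_x != tx or new_y != ty):
--         if abs(tx - new_x) >= abs(ty - new_y):
--             new_x += 1 if tx - new_x > 0 else -1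
--         else:
--             new_y += 1 if ty - new_y > 0 else -1
--         steps -= 1
--     return (new_x, new_y)
-- ===== SOURCE B (Python) =====
-- def move_towards(x, y, tx, ty, max_steps):
--     dx = tx - x
--     dy = ty - y
--     a = abs(dx)
--     b = abs(dy)
--     if a + b <= max_steps:
--         return (tx, ty)
--     s = max(max_steps, 0)
--     ar = a - s if a - s >= b else (a if b - s > a else (a + b - s) // 2)
--     br = a + b - s - ar
--     sx = a - ar
--     sy = b - br
--     return (x + (sx if dx > 0 else -sx), y + (sy if dy > 0 else -sy))
-- ===== Notes on version B (the rewrite author's own statement) =====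
-- stated objective: faster
-- what changed: Replaces A's step-by-step greedy while-loop (one unit move per iteration, up to max_steps iterations) with a closed-form O(1) split of the step budget between the two axes (all steps to the larger gap when it dominates, otherwise an equalizing floor/ceil split matching the tie-to-x rule).
import Mathlib
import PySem

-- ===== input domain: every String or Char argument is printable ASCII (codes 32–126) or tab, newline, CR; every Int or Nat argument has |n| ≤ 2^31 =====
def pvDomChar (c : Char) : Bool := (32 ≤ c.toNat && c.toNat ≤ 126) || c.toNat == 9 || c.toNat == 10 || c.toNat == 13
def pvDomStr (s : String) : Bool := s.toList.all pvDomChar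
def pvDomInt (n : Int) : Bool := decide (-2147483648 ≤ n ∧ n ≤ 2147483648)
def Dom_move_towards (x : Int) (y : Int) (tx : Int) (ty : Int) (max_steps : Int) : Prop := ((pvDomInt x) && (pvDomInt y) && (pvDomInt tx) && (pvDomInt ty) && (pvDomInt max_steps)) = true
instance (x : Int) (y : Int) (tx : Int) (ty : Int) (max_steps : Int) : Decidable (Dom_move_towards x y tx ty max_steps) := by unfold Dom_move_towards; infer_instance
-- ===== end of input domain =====

-- B replaces A's O(max_steps) step-by-step greedy loop by an O(1) closed-form split of the
-- steps between the two axes (larger-gap-first, tie to x); objective: faster (asymptotic).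

-- Python's abs on ints (shared by both ports)
def pyAbs (n : Int) : Int := if n < 0 then -n else n

-- ===== PORT A =====
-- the while-loop of A, state (new_x, new_y, steps)
def moveLoop (tx : Int) (ty : Int) (nx : Int) (ny : Int) (steps : Int) : Int × Int :=
  if steps > 0 ∧ (nx ≠ tx ∨ ny ≠ ty) then
    if pyAbs (tx - nx) ≥ pyAbs (ty - ny) then
      moveLoop tx ty (nx + (if tx - nx > 0 then 1 else -1)) ny (steps - 1)
    else
      moveLoop tx ty nx (ny + (if ty - ny > 0 then 1 else -1)) (steps - 1)
  else (nx, ny)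
termination_by steps.toNat
decreasing_by all_goals omega

def move_towards (x : Int) (y : Int) (tx : Int) (ty : Int) (max_steps : Int) : List Int :=
  let dx := tx - x
  let dy := ty - y
  if pyAbs dx + pyAbs dy ≤ max_steps then [tx, ty]
  else
    let p := moveLoop tx ty x y max_steps
    [p.1, p.2]

-- ===== PORT B =====
def move_towards_alt (x : Int) (y : Int) (tx : Int) (ty : Int) (max_steps : Int) : List Int :=
  let dx := tx - x
  let dy := ty - y
  let a := pyAbs dx
  let b := pyAbs dy
  if a + b ≤ max_steps then [tx, ty]
  else
    let s := max max_steps 0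
    let ar := if a - s ≥ b then a - s
              else if b - s > a then a
              else PySem.Int.floordiv (a + b - s) 2
    let br := a + b - s - ar
    let sx := a - ar
    let sy := b - br
    [x + (if dx > 0 then sx else -sx), y + (if dy > 0 then sy else -sy)]

-- ===== PRECONDITION & SPEC =====
def Spec_move_towards (x : Int) (y : Int) (tx : Int) (ty : Int) (max_steps : Int) (out : List Int) : Prop := out = move_towards_alt x y tx ty max_steps
instance (x : Int) (y : Int) (tx : Int) (ty : Int) (max_steps : Int) (out : List Int) : Decidable (Spec_move_towards x y tx ty max_steps out) := by unfold Spec_move_towards; infer_instance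

-- ===== CLAIM (what is proved, stated in full; the proofs are below) =====
def Claim_equal_move_towards : Prop := ∀ (x : Int) (y : Int) (tx : Int) (ty : Int) (max_steps : Int), Dom_move_towards x y tx ty max_steps → Spec_move_towards x y tx ty max_steps (move_towards x y tx ty max_steps)

-- ===== LEMMAS AND PROOFS =====

-- the remaining (|dx|,|dy|) after distributing s greedy steps (B's split, abs form)
def gsplit (a : Int) (b : Int) (s : Int) : Int × Int :=
  let ar := if a - s ≥ b then a - s
            else if b - s > a then a
            else PySem.Int.floordiv (a + b - s) 2
  (ar, a + b - s - ar)

-- B's else-branch, as a pair, for an arbitrary loop state (nx, ny, s)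
def gclose (tx : Int) (ty : Int) (nx : Int) (ny : Int) (s0 : Int) : Int × Int :=
  (nx + (if tx - nx > 0 then pyAbs (tx - nx) - (gsplit (pyAbs (tx - nx)) (pyAbs (ty - ny)) (max s0 0)).1
         else -(pyAbs (tx - nx) - (gsplit (pyAbs (tx - nx)) (pyAbs (ty - ny)) (max s0 0)).1)),
   ny + (if ty - ny > 0 then pyAbs (ty - ny) - (gsplit (pyAbs (tx - nx)) (pyAbs (ty - ny)) (max s0 0)).2
         else -(pyAbs (ty - ny) - (gsplit (pyAbs (tx - nx)) (pyAbs (ty - ny)) (max s0 0)).2)))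

theorem move_towards_alt_eq (x y tx ty m : Int) :
    move_towards_alt x y tx ty m =
      if pyAbs (tx - x) + pyAbs (ty - y) ≤ m then [tx, ty]
      else [(gclose tx ty x y m).1, (gclose tx ty x y m).2] := by
  simp only [move_towards_alt, gclose, gsplit]

theorem fd2_bounds (d : Int) : 2 * PySem.Int.floordiv d 2 ≤ d ∧ d ≤ 2 * PySem.Int.floordiv d 2 + 1 := by
  have h := PySem.Int.floordiv_mul_add_mod d 2
  have h1 : 0 ≤ PySem.Int.mod d 2 := PySem.Int.mod_nonneg d (by norm_num)
  have h2 : PySem.Int.mod d 2 < 2 := PySem.Int.mod_lt d (by norm_num)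
  omega

theorem gsplit_zero (a b : Int) : gsplit a b 0 = (a, b) := by
  unfold gsplit
  simp only [Prod.mk.injEq]
  split_ifs <;> omega

theorem gsplit_bounds (a b s : Int) (ha : 0 ≤ a) (hb : 0 ≤ b) (hs : 0 ≤ s) (hd : a + b > s) :
    0 ≤ (gsplit a b s).1 ∧ (gsplit a b s).1 ≤ a ∧ 0 ≤ (gsplit a b s).2 ∧ (gsplit a b s).2 ≤ b := by
  obtain ⟨h1, h2⟩ := fd2_bounds (a + b - s)
  unfold gsplit
  simp only
  split_ifs <;> omega

theorem gsplit_step_x (a b s : Int) (_hb : 0 ≤ b) (hs : 0 < s) (_hd : a + b > s) (hax : a ≥ b) :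
    gsplit (a - 1) b (s - 1) = gsplit a b s := by
  obtain ⟨h1, h2⟩ := fd2_bounds (a + b - s)
  unfold gsplit
  have e : a - 1 + b - (s - 1) = a + b - s := by ring
  rw [e]
  simp only [Prod.mk.injEq]
  split_ifs <;> omega

theorem gsplit_step_y (a b s : Int) (_ha : 0 ≤ a) (hs : 0 < s) (_hd : a + b > s) (hax : ¬ a ≥ b) :
    gsplit a (b - 1) (s - 1) = gsplit a b s := by
  obtain ⟨h1, h2⟩ := fd2_bounds (a + b - s)
  unfold gsplit
  have e : a + (b - 1) - (s - 1) = a + b - s := by ring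
  rw [e]
  simp only [Prod.mk.injEq]
  split_ifs <;> omega

theorem pyAbs_nonneg (n : Int) : 0 ≤ pyAbs n := by unfold pyAbs; split_ifs <;> omega

-- one greedy step commutes with the closed form
theorem gclose_step (tx ty nx ny s : Int) (hs : s > 0)
    (hd : pyAbs (tx - nx) + pyAbs (ty - ny) > s) :
    (if pyAbs (tx - nx) ≥ pyAbs (ty - ny) then
       gclose tx ty (nx + (if tx - nx > 0 then 1 else -1)) ny (s - 1)
     else
       gclose tx ty nx (ny + (if ty - ny > 0 then 1 else -1)) (s - 1))
    = gclose tx ty nx ny s := by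
  have hms : max s 0 = s := by omega
  have hms' : max (s - 1) 0 = s - 1 := by omega
  have ha0 := pyAbs_nonneg (tx - nx)
  have hb0 := pyAbs_nonneg (ty - ny)
  by_cases hax : pyAbs (tx - nx) ≥ pyAbs (ty - ny)
  · rw [if_pos hax]
    have hdx : tx - nx ≠ 0 := by
      intro h0
      have hA : pyAbs (tx - nx) = 0 := by rw [h0]; rfl
      omega
    obtain ⟨hp1, hp2, hp3, hp4⟩ :=
      gsplit_bounds (pyAbs (tx - nx)) (pyAbs (ty - ny)) s ha0 hb0 (by omega) hd
    obtain ⟨hq1, hq2, hq3, hq4⟩ :=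
      gsplit_bounds (pyAbs (tx - nx) - 1) (pyAbs (ty - ny)) (s - 1) (by
        by_cases h : tx - nx > 0 <;> · unfold pyAbs; split_ifs <;> omega) hb0 (by omega) (by omega)
    rw [gsplit_step_x _ _ _ hb0 hs hd hax] at hq1 hq2 hq3 hq4
    by_cases hpos : tx - nx > 0
    · rw [if_pos hpos]
      have hA : pyAbs (tx - nx) = tx - nx := by unfold pyAbs; split_ifs <;> omega
      have hA' : pyAbs (tx - (nx + 1)) = pyAbs (tx - nx) - 1 := by
        unfold pyAbs; split_ifs <;> omega
      unfold gclose
      rw [hms, hms', hA', gsplit_step_x _ _ _ hb0 hs hd hax]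
      simp only [Prod.mk.injEq, and_true]
      split_ifs <;> omega
    · rw [if_neg hpos]
      have hA : pyAbs (tx - nx) = -(tx - nx) := by unfold pyAbs; split_ifs <;> omega
      have hA' : pyAbs (tx - (nx + -1)) = pyAbs (tx - nx) - 1 := by
        unfold pyAbs; split_ifs <;> omega
      unfold gclose
      rw [hms, hms', hA', gsplit_step_x _ _ _ hb0 hs hd hax]
      simp only [Prod.mk.injEq, and_true]
      split_ifs <;> omega
  · rw [if_neg hax]
    have hdy : ty - ny ≠ 0 := by
      intro h0
      have hB : pyAbs (ty - ny) = 0 := by rw [h0]; rfl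
      omega
    obtain ⟨hp1, hp2, hp3, hp4⟩ :=
      gsplit_bounds (pyAbs (tx - nx)) (pyAbs (ty - ny)) s ha0 hb0 (by omega) hd
    obtain ⟨hq1, hq2, hq3, hq4⟩ :=
      gsplit_bounds (pyAbs (tx - nx)) (pyAbs (ty - ny) - 1) (s - 1) ha0 (by
        by_cases h : ty - ny > 0 <;> · unfold pyAbs; split_ifs <;> omega) (by omega) (by omega)
    rw [gsplit_step_y _ _ _ ha0 hs hd hax] at hq1 hq2 hq3 hq4
    by_cases hpos : ty - ny > 0
    · rw [if_pos hpos]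
      have hB : pyAbs (ty - ny) = ty - ny := by unfold pyAbs; split_ifs <;> omega
      have hB' : pyAbs (ty - (ny + 1)) = pyAbs (ty - ny) - 1 := by
        unfold pyAbs; split_ifs <;> omega
      unfold gclose
      rw [hms, hms', hB', gsplit_step_y _ _ _ ha0 hs hd hax]
      simp only [Prod.mk.injEq, true_and]
      split_ifs <;> omega
    · rw [if_neg hpos]
      have hB : pyAbs (ty - ny) = -(ty - ny) := by unfold pyAbs; split_ifs <;> omega
      have hB' : pyAbs (ty - (ny + -1)) = pyAbs (ty - ny) - 1 := by
        unfold pyAbs; split_ifs <;> omega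
      unfold gclose
      rw [hms, hms', hB', gsplit_step_y _ _ _ ha0 hs hd hax]
      simp only [Prod.mk.injEq, true_and]
      split_ifs <;> omega

-- the loop equals the closed form whenever the remaining distance exceeds the steps
theorem loop_eq_gclose (n : Nat) : ∀ (tx ty nx ny s : Int), s.toNat ≤ n →
    pyAbs (tx - nx) + pyAbs (ty - ny) > s →
    moveLoop tx ty nx ny s = gclose tx ty nx ny s := by
  induction n with
  | zero =>
    intro tx ty nx ny s hle hd
    rw [moveLoop, if_neg (by omega : ¬ (s > 0 ∧ (nx ≠ tx ∨ ny ≠ ty)))]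
    unfold gclose
    rw [(by omega : max s 0 = 0), gsplit_zero]
    simp only [Prod.mk.injEq]
    constructor <;> (split_ifs <;> omega)
  | succ n ih =>
    intro tx ty nx ny s hle hd
    by_cases hs : s > 0
    · have ha0 := pyAbs_nonneg (tx - nx)
      have hb0 := pyAbs_nonneg (ty - ny)
      have hne : nx ≠ tx ∨ ny ≠ ty := by
        by_contra h
        rw [not_or, not_not, not_not] at h
        have hA : pyAbs (tx - nx) = 0 := by rw [h.1]; simp [pyAbs]
        have hB : pyAbs (ty - ny) = 0 := by rw [h.2]; simp [pyAbs]
        omega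
      rw [moveLoop, if_pos ⟨hs, hne⟩]
      rw [← gclose_step tx ty nx ny s hs hd]
      by_cases hax : pyAbs (tx - nx) ≥ pyAbs (ty - ny)
      · rw [if_pos hax, if_pos hax]
        have hdx : tx - nx ≠ 0 := by
          intro h0
          have hA : pyAbs (tx - nx) = 0 := by rw [h0]; rfl
          omega
        by_cases hpos : tx - nx > 0
        · rw [if_pos hpos]
          exact ih _ _ _ _ _ (by omega) (by
            have hA' : pyAbs (tx - (nx + 1)) = pyAbs (tx - nx) - 1 := by
              unfold pyAbs; split_ifs <;> omega
            omega)
        · rw [if_neg hpos]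
          exact ih _ _ _ _ _ (by omega) (by
            have hA' : pyAbs (tx - (nx + -1)) = pyAbs (tx - nx) - 1 := by
              unfold pyAbs; split_ifs <;> omega
            omega)
      · rw [if_neg hax, if_neg hax]
        have hdy : ty - ny ≠ 0 := by
          intro h0
          have hB : pyAbs (ty - ny) = 0 := by rw [h0]; rfl
          omega
        by_cases hpos : ty - ny > 0
        · rw [if_pos hpos]
          exact ih _ _ _ _ _ (by omega) (by
            have hB' : pyAbs (ty - (ny + 1)) = pyAbs (ty - ny) - 1 := by
              unfold pyAbs; split_ifs <;> omega
            omega)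
        · rw [if_neg hpos]
          exact ih _ _ _ _ _ (by omega) (by
            have hB' : pyAbs (ty - (ny + -1)) = pyAbs (ty - ny) - 1 := by
              unfold pyAbs; split_ifs <;> omega
            omega)
    · rw [moveLoop, if_neg (by omega : ¬ (s > 0 ∧ (nx ≠ tx ∨ ny ≠ ty)))]
      unfold gclose
      rw [(by omega : max s 0 = 0), gsplit_zero]
      simp only [Prod.mk.injEq]
      constructor <;> (split_ifs <;> omega)

-- ===== VERDICT (by name: the statement is the Claim_ definition above) =====
theorem move_towards_spec : Claim_equal_move_towards := by
  intro x y tx ty m _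
  unfold Spec_move_towards
  rw [move_towards_alt_eq]
  simp only [move_towards]
  by_cases h : pyAbs (tx - x) + pyAbs (ty - y) ≤ m
  · rw [if_pos h, if_pos h]
  · rw [if_neg h, if_neg h]
    rw [loop_eq_gclose (m.toNat) tx ty x y m (le_refl _) (by omega)]
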